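-- pv_equiv track=rewrite | github.com/ahmedsidi9/CS-GAMES-EXAM | extreme/sapin.py | gen_sapin
-- ===== SOURCE A (Python) =====
-- def gen_sapin(height=10):
--
--     symbols = ['o', '.']
--     tree_char = '.'
--
--     tree = []
--
--     tree.append(" " * height + ".")
--
--     # each level of the tree
--     for i in range(height):
--         level = ""
--         padding = " " * (height - i)
--         for j in range(2 * i + 1):
--             char = symbols[(i + j) % 2] if j % 2 == 0 else tree_char
--             level += char
--         tree.append(padding + level)
--
--     trunk_width = 1 if height % 2 == 0 else 3
--     trunk = " " * (height - 1) + "|" * trunk_width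
--     tree.append(trunk)
--
--     message = " " * (height - 6) + "Merry Christmas!"
--     tree.append(message)
--
--     return "\n".join(tree)
-- ===== SOURCE B (Python) =====
-- def gen_sapin(height=10):
--     rows = [" " * height + "."]
--     rows += [" " * (height - i)
--              + ("o." * i + "o" if i % 2 == 0 else "." * (2 * i + 1))
--              for i in range(height)]
--     rows.append(" " * (height - 1) + "|" * (1 if height % 2 == 0 else 3))
--     rows.append(" " * (height - 6) + "Merry Christmas!")
--     return "\n".join(rows)
-- ===== Notes on version B (the rewrite author's own statement) =====
-- stated objective: simpler
-- what changed: Each tree row is produced in closed form by string repetition ('o.'*i+'o' for even i, '.'*(2i+1) for odd i) inside a list comprehension, eliminating A's inner per-character loop and its parity-indexed symbol lookup.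
import Mathlib
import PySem

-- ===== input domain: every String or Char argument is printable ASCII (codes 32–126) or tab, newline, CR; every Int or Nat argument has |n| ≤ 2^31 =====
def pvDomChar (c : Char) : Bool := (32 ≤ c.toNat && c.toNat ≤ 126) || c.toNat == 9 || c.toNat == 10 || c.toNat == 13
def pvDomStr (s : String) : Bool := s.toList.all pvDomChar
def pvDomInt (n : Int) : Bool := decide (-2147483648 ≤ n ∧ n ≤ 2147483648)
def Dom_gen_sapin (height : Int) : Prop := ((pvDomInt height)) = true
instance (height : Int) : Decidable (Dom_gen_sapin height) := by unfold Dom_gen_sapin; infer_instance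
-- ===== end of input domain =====

-- B builds each tree row in closed form by string repetition instead of A's inner per-character loop; objective: simpler.
-- Both ports work on List Char (PySem.Chars) and convert to String at the end.

-- ===== PORT A =====
-- symbols[(i+j) % 2] with symbols = ['o', '.']: the index is always 0 or 1, so pyGet? is always some and .getD [] never supplies the default
def sapinCharA (i j : Int) : List Char :=
  if PySem.Int.mod j 2 == 0 then
    (PySem.List.pyGet? [['o'], ['.']] (PySem.Int.mod (i + j) 2)).getD []
  else ['.']

def gen_sapin (height : Int) : String :=
  let tree : List (List Char) := [PySem.List.pyRepeat [' '] height ++ ['.']]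
  let tree := (PySem.List.pyRange 0 height 1).foldl (fun tree i =>
    let padding := PySem.List.pyRepeat [' '] (height - i)
    let level := (PySem.List.pyRange 0 (2 * i + 1) 1).foldl
      (fun level j => level ++ sapinCharA i j) []
    tree ++ [padding ++ level]) tree
  let trunk_width : Int := if PySem.Int.mod height 2 == 0 then 1 else 3
  let tree := tree ++ [PySem.List.pyRepeat [' '] (height - 1) ++ PySem.List.pyRepeat ['|'] trunk_width]
  let tree := tree ++ [PySem.List.pyRepeat [' '] (height - 6) ++ "Merry Christmas!".toList]
  String.mk (PySem.Chars.join ['\n'] tree)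

-- ===== PORT B =====
def sapinRowB (height i : Int) : List Char :=
  PySem.List.pyRepeat [' '] (height - i) ++
    (if PySem.Int.mod i 2 == 0 then PySem.List.pyRepeat ['o', '.'] i ++ ['o']
     else PySem.List.pyRepeat ['.'] (2 * i + 1))

def gen_sapin_alt (height : Int) : String :=
  let rows : List (List Char) :=
    (PySem.List.pyRepeat [' '] height ++ ['.']) ::
      (PySem.List.pyRange 0 height 1).map (sapinRowB height)
  let rows := rows ++ [PySem.List.pyRepeat [' '] (height - 1) ++
    PySem.List.pyRepeat ['|'] (if PySem.Int.mod height 2 == 0 then 1 else 3)]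
  let rows := rows ++ [PySem.List.pyRepeat [' '] (height - 6) ++ "Merry Christmas!".toList]
  String.mk (PySem.Chars.join ['\n'] rows)

-- ===== PRECONDITION & SPEC =====
def Spec_gen_sapin (height : Int) (out : String) : Prop := out = gen_sapin_alt height
instance (height : Int) (out : String) : Decidable (Spec_gen_sapin height out) := by unfold Spec_gen_sapin; infer_instance

-- ===== CLAIM (what is proved, stated in full; the proofs are below) =====
def Claim_equal_gen_sapin : Prop := ∀ (height : Int), Dom_gen_sapin height → Spec_gen_sapin height (gen_sapin height)

-- ===== LEMMAS AND PROOFS =====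

-- A's inner loop for an even row index is the alternating pattern 'o.'*k + 'o'
lemma evenLevel (k : Nat) :
    (List.range (2*k+1)).flatMap (fun j => if j % 2 == 0 then ['o'] else ['.'])
      = (List.replicate k (['o','.'] : List Char)).flatten ++ ['o'] := by
  induction k with
  | zero => decide
  | succ k ih =>
    have h1 : 2*(k+1)+1 = (2*k+1) + 1 + 1 := by ring
    rw [h1, List.range_succ, List.range_succ, List.flatMap_append, List.flatMap_append, ih]
    have e1 : (2*k+1) % 2 = 1 := by omega
    have e2 : (2*k+1+1) % 2 = 0 := by omega
    simp [e1, e2, List.replicate_succ']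

-- A's inner loop for an odd row index is all dots
lemma oddLevel (k : Nat) :
    (List.range (2*k+1)).flatMap (fun _ => (['.'] : List Char)) = List.replicate (2*k+1) '.' := by
  induction (2*k+1) with
  | zero => rfl
  | succ n ih => rw [List.range_succ, List.flatMap_append, ih, List.replicate_succ']; rfl

-- A's inner character loop (as a flatMap) equals B's closed-form level body, Nat index
lemma natLevel (k : Nat) :
    (List.range (2*k+1)).flatMap (fun (j : Nat) => sapinCharA (k : Int) (j : Int))
      = (if PySem.Int.mod (k : Int) 2 == 0
         then PySem.List.pyRepeat ['o','.'] (k : Int) ++ ['o']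
         else PySem.List.pyRepeat ['.'] (2*(k : Int)+1)) := by
  have h2 : (2:Int) = ((2:Nat):Int) := rfl
  have hbody : ∀ j ∈ List.range (2*k+1), sapinCharA (k : Int) (j : Int)
      = (if j % 2 == 0 then (if k % 2 == 0 then (['o'] : List Char) else ['.']) else ['.']) := by
    intro j _
    unfold sapinCharA
    have hc : ((k : Int) + (j : Int)) = ((k + j : Nat) : Int) := by push_cast; ring
    rw [hc, h2, PySem.Int.mod_natCast, PySem.Int.mod_natCast]
    by_cases hj : j % 2 = 0
    · have hkj : (k + j) % 2 = k % 2 := by omega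
      rw [hkj]
      by_cases hk : k % 2 = 0
      · simp [hj, hk, PySem.List.pyGet?, PySem.List.pyIdx?]
      · have hk1 : k % 2 = 1 := by omega
        simp [hj, hk1, PySem.List.pyGet?, PySem.List.pyIdx?]
    · have hj1 : j % 2 = 1 := by omega
      simp [hj1]
  rw [List.flatMap_congr hbody, h2, PySem.Int.mod_natCast]
  by_cases hk : k % 2 = 0
  · have := evenLevel k
    simp only [hk] at this ⊢
    simp only [PySem.List.pyRepeat, Int.toNat_natCast]
    simpa using this
  · have hk1 : k % 2 = 1 := by omega
    simp only [hk1, Nat.cast_one, show ((1:Int) == 0) = false from rfl, Bool.false_eq_true,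
      PySem.List.pyRepeat_singleton, Nat.cast_ofNat, if_false]
    have ht : ((2:Int) * k + 1).toNat = 2*k+1 := by omega
    rw [ht]
    simp only [show ((1:Nat) == 0) = false from rfl, Bool.false_eq_true, if_false, ite_self]
    exact oddLevel k

-- A's inner character loop equals B's closed-form level body, for any nonnegative Int row index
lemma level_eq (i : Int) (hi : 0 ≤ i) :
    (PySem.List.pyRange 0 (2 * i + 1) 1).foldl (fun level j => level ++ sapinCharA i j) [] =
      (if PySem.Int.mod i 2 == 0 then PySem.List.pyRepeat ['o', '.'] i ++ ['o']
       else PySem.List.pyRepeat ['.'] (2 * i + 1)) := by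
  obtain ⟨k, rfl⟩ : ∃ k : Nat, i = (k : Int) := ⟨i.toNat, (Int.toNat_of_nonneg hi).symm⟩
  rw [PySem.List.foldl_append_eq_flatMap, PySem.List.pyRange_zero]
  have ht : ((2 * (k : Int) + 1)).toNat = 2*k+1 := by omega
  rw [ht, List.flatMap_map]
  simpa using natLevel k

theorem gen_sapin_spec : Claim_equal_gen_sapin := by
  intro height _
  unfold Spec_gen_sapin
  show gen_sapin height = gen_sapin_alt height
  unfold gen_sapin gen_sapin_alt
  dsimp only
  rw [PySem.List.foldl_append_singleton_eq_map]
  congr 2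
  rw [List.singleton_append]
  congr 1
  congr 1
  congr 1
  apply List.map_congr_left
  intro i hi
  have h0 : 0 ≤ i := ((PySem.List.mem_pyRange_one).mp hi).1
  unfold sapinRowB
  rw [level_eq i h0]
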